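-- pv_equiv track=rewrite | github.com/Terlen/Jinglyshines | utils/aggregateAnalysis.py | getMembersWorstRatio
-- ===== SOURCE A (Python) =====
-- def getMembersWorstRatio(ratios):
--     items = ratios.items()
--     stats = ratios.values()
--     ratioValues = [item[2] for item in ratios.values()]
--     try:
--         minRatio = min(ratioValues)
--         worst = [(key,value[0],value[1],value[2]) for key, value in items if value[2] == minRatio]
--         return worst
--     except ValueError:
--         return None
-- ===== SOURCE B (Python) =====
-- def getMembersWorstRatio(ratios):
--     minRatio = None
--     result = None
--     for key, value in ratios.items():
--         v = value[2]
--         if result is None or v < minRatio: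
--             minRatio = v
--             result = [(key, value[0], value[1], value[2])]
--         elif v == minRatio:
--             result.append((key, value[0], value[1], value[2]))
--     return result
-- ===== Notes on version B (the rewrite author's own statement) =====
-- stated objective: alternative
-- what changed: Replaced the min-then-filter two-pass (build ratio list, min(), comprehension filter) with a single fused pass that maintains the running minimum and resets/extends the result list, preserving insertion order of ties and the empty-dict None via the unset result.
import Mathlib
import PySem

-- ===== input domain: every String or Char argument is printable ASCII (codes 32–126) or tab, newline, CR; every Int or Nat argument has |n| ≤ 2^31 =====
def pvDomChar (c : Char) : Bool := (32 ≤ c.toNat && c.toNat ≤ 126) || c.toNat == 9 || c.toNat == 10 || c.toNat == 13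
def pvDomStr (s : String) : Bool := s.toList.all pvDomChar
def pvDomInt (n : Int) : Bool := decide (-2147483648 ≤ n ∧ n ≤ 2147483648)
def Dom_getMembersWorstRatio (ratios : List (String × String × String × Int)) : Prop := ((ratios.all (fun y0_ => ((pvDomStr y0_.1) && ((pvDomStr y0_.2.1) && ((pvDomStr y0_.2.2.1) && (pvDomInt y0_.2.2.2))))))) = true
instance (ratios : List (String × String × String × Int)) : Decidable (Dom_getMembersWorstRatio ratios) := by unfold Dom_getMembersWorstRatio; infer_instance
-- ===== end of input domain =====

-- B fuses A's min-then-filter two passes into one pass keeping a running minimum and result list (objective: alternative, same cost).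

-- ===== PORT A =====
def getMembersWorstRatio (ratios : List (String × String × String × Int)) : Option (List (String × String × String × Int)) :=
  let d := PySem.Dict.ofList ratios
  let items := d.items
  let stats := d.values
  let ratioValues := stats.map (fun item => item.2.2)
  -- 'min' of an empty list raises ValueError, caught → None; min? returns none exactly there
  match PySem.List.min? ratioValues (fun x => x) with
  | none => none
  | some minRatio =>
      some ((items.filter (fun kv => kv.2.2.2 == minRatio)).map
        (fun kv => (kv.1, kv.2.1, kv.2.2.1, kv.2.2.2)))

-- ===== PORT B =====
-- state: none = result is None; some (minRatio, result)
def altStep (st : Option (Int × List (String × String × String × Int)))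
    (kv : String × String × String × Int) :
    Option (Int × List (String × String × String × Int)) :=
  let v := kv.2.2.2
  match st with
  | none => some (v, [(kv.1, kv.2.1, kv.2.2.1, kv.2.2.2)])
  | some (m, acc) =>
      if v < m then some (v, [(kv.1, kv.2.1, kv.2.2.1, kv.2.2.2)])
      else if v == m then some (m, acc ++ [(kv.1, kv.2.1, kv.2.2.1, kv.2.2.2)])
      else some (m, acc)

def getMembersWorstRatio_alt (ratios : List (String × String × String × Int)) : Option (List (String × String × String × Int)) :=
  match (PySem.Dict.ofList ratios).items.foldl altStep none with
  | none => none
  | some st => some st.2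

-- ===== PRECONDITION & SPEC =====
def Spec_getMembersWorstRatio (ratios : List (String × String × String × Int)) (out : Option (List (String × String × String × Int))) : Prop := out = getMembersWorstRatio_alt ratios
instance (ratios : List (String × String × String × Int)) (out : Option (List (String × String × String × Int))) : Decidable (Spec_getMembersWorstRatio ratios out) := by unfold Spec_getMembersWorstRatio; infer_instance

-- ===== CLAIM (what is proved, stated in full; the proofs are below) =====
def Claim_equal_getMembersWorstRatio : Prop := ∀ (ratios : List (String × String × String × Int)), Dom_getMembersWorstRatio ratios → Spec_getMembersWorstRatio ratios (getMembersWorstRatio ratios)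

-- ===== LEMMAS AND PROOFS =====

-- invariant of B's fused loop, for any item list and a live state
theorem altStep_foldl_inv (l : List (String × String × String × Int)) (m : Int)
    (acc : List (String × String × String × Int)) :
    l.foldl altStep (some (m, acc)) =
      some (l.foldl (fun a kv => min a kv.2.2.2) m,
        (if l.foldl (fun a kv => min a kv.2.2.2) m = m then acc else []) ++
        (l.filter (fun kv => kv.2.2.2 == l.foldl (fun a kv => min a kv.2.2.2) m)).map
          (fun kv => (kv.1, kv.2.1, kv.2.2.1, kv.2.2.2))) := by
  induction l generalizing m acc with
  | nil => simp
  | cons kv t ih =>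
    have hle : t.foldl (fun a kv => min a kv.2.2.2) (min m kv.2.2.2) ≤ min m kv.2.2.2 := by
      have := (PySem.List.foldl_min_le (t.map (fun kv => kv.2.2.2)) (min m kv.2.2.2)).1
      simpa [List.foldl_map] using this
    simp only [List.foldl_cons, altStep]
    by_cases h1 : kv.2.2.2 < m
    · have hmin : min m kv.2.2.2 = kv.2.2.2 := by omega
      rw [hmin] at hle
      rw [if_pos h1, ih]
      simp only [hmin]
      rw [List.filter_cons]
      generalize hg : t.foldl (fun a kv => min a kv.2.2.2) kv.2.2.2 = M at *
      have hMne : ¬ M = m := by omega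
      rw [if_neg hMne]
      by_cases h2 : M = kv.2.2.2
      · have hb : (kv.2.2.2 == M) = true := by simp [h2]
        simp [h2]
      · have hb : (kv.2.2.2 == M) = false := by simp; omega
        simp [if_neg h2, hb]
    · have hmin : min m kv.2.2.2 = m := by omega
      rw [hmin] at hle
      rw [if_neg h1]
      by_cases h2 : kv.2.2.2 = m
      · have hbeq : (kv.2.2.2 == m) = true := by simp [h2]
        rw [hbeq, if_pos rfl, ih]
        simp only [hmin]
        rw [List.filter_cons]
        generalize hg : t.foldl (fun a kv => min a kv.2.2.2) m = M at *
        by_cases h3 : M = m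
        · have hb : (kv.2.2.2 == M) = true := by simp [h2, h3]
          simp [h3, ← h2]
        · have hb : (kv.2.2.2 == M) = false := by simp [h2]; omega
          simp [if_neg h3, hb]
      · have hbeq : (kv.2.2.2 == m) = false := by simpa using h2
        rw [hbeq, if_neg (by simp), ih]
        simp only [hmin]
        rw [List.filter_cons]
        generalize hg : t.foldl (fun a kv => min a kv.2.2.2) m = M at *
        have hb : (kv.2.2.2 == M) = false := by simp; omega
        simp [hb]

-- both ports agree for any item list (applied to the dict's items)
theorem ports_agree (l : List (String × String × String × Int)) :
    (match PySem.List.min? (l.map (fun kv => kv.2.2.2)) (fun x => x) with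
      | none => none
      | some minRatio =>
          some ((l.filter (fun kv => kv.2.2.2 == minRatio)).map
            (fun kv => (kv.1, kv.2.1, kv.2.2.1, kv.2.2.2)))) =
    (match l.foldl altStep none with
      | none => none
      | some st => some st.2) := by
  cases l with
  | nil => simp [PySem.List.min?]
  | cons kv t =>
    simp only [List.map_cons, PySem.List.min?_id_cons, List.foldl_cons, altStep,
      altStep_foldl_inv, List.foldl_map]
    generalize hg : t.foldl (fun a kv => min a kv.2.2.2) kv.2.2.2 = M
    rw [List.filter_cons]
    by_cases h1 : M = kv.2.2.2
    · have hb : (kv.2.2.2 == M) = true := by simp [h1]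
      simp [h1]
    · have hb : (kv.2.2.2 == M) = false := by
        simp only [beq_eq_false_iff_ne, ne_eq]
        exact fun h => h1 h.symm
      simp [if_neg h1, hb]

-- ===== VERDICT (by name: the statement is the Claim_ definition above) =====
theorem getMembersWorstRatio_spec : Claim_equal_getMembersWorstRatio := by
  intro ratios _
  unfold Spec_getMembersWorstRatio getMembersWorstRatio getMembersWorstRatio_alt
  have h := ports_agree (PySem.Dict.ofList ratios).items
  simpa [PySem.Dict.values, List.map_map, Function.comp] using h
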